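-- pv_equiv track=rewrite | github.com/vizeet/bitcoinbook | txn/CreateP2SHTransaction.py | amount_compress
-- ===== SOURCE A (Python) =====
-- def amount_compress(n: int):
--     if n == 0:
--         return 0;
--     e = 0
--     while ((n % 10) == 0) and e < 9:
--         n //= 10
--         e += 1
--     if e < 9:
--         d = n % 10
--         assert d >= 1 and d <= 9
--         n //= 10
--         return 1 + (n*9 + d - 1)*10 + e
--     else:
--         return 1 + (n - 1)*10 + 9
-- ===== SOURCE B (Python) =====
-- def amount_compress(n: int):
--     if n == 0:
--         return 0
--     # trailing-zero exponent (capped at 9) read off the decimal string representation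
--     s = str(n)
--     e = min(9, len(s) - len(s.rstrip('0')))
--     n //= 10 ** e
--     if e < 9:
--         d = n % 10
--         assert d >= 1 and d <= 9
--         n //= 10
--         return 1 + (n * 9 + d - 1) * 10 + e
--     return 1 + (n - 1) * 10 + 9
-- ===== Notes on version B (the rewrite author's own statement) =====
-- stated objective: alternative
-- what changed: B switches data representation: instead of A's repeated-division counting loop it converts n to its decimal string once and reads the capped trailing-zero exponent off the string with rstrip, then does a single exact division before the unchanged tail encoding.
import Mathlib
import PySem

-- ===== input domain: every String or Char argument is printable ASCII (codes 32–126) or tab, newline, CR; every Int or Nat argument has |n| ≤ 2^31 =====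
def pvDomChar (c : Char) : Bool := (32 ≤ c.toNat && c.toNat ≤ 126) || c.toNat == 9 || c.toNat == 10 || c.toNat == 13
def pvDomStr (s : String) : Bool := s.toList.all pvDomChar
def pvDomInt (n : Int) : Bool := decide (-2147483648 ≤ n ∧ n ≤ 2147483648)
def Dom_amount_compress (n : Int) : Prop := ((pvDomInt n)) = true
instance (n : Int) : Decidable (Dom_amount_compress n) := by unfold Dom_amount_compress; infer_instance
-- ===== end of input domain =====

-- B replaces A's repeated-division counting loop by reading the (capped) trailing-zero
-- exponent off the decimal string of n; same cost, alternative representation.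

-- ===== PORT A =====
-- A's while loop: divide by 10 while n % 10 == 0 and e < 9, counting e.
def pvLoopA (n e : Int) : Int × Int :=
  if PySem.Int.mod n 10 = 0 ∧ e < 9 then pvLoopA (PySem.Int.floordiv n 10) (e + 1) else (n, e)
termination_by (9 - e).toNat
decreasing_by omega

-- The Python assert `d >= 1 and d <= 9` provably never fires (after the loop with e < 9,
-- n % 10 ≠ 0), so the port carries no failure case for it.
def amount_compress (n : Int) : Int :=
  if n = 0 then 0 else
    let p := pvLoopA n 0
    let n1 := p.1
    let e := p.2
    if e < 9 then
      let d := PySem.Int.mod n1 10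
      let n2 := PySem.Int.floordiv n1 10
      1 + (n2 * 9 + d - 1) * 10 + e
    else
      1 + (n1 - 1) * 10 + 9

-- ===== PORT B =====
-- s.rstrip('0'), hand-ported (PySem has no rstrip-with-chars form): drop the trailing '0'
-- characters; exact for any character list.
def pvRstrip0 (cs : List Char) : List Char := (cs.reverse.dropWhile (fun c => c == '0')).reverse

-- str(n) is ported at the List Char level via PySem.Int.toChars (= (PySem.Int.toStr n).toList,
-- lemma toList_toStr), so len(s) and len(s.rstrip('0')) are the list lengths.
-- B's assert also never fires; no failure case.
def amount_compress_alt (n : Int) : Int :=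
  if n = 0 then 0 else
    let s := PySem.Int.toChars n
    let e : Int := min 9 ((s.length : Int) - ((pvRstrip0 s).length : Int))
    let n1 := PySem.Int.floordiv n ((10 : Int) ^ e.toNat)
    if e < 9 then
      let d := PySem.Int.mod n1 10
      let n2 := PySem.Int.floordiv n1 10
      1 + (n2 * 9 + d - 1) * 10 + e
    else
      1 + (n1 - 1) * 10 + 9

-- ===== PRECONDITION & SPEC =====
def Spec_amount_compress (n : Int) (out : Int) : Prop := out = amount_compress_alt n
instance (n : Int) (out : Int) : Decidable (Spec_amount_compress n out) := by unfold Spec_amount_compress; infer_instance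

-- ===== CLAIM (what is proved, stated in full; the proofs are below) =====
def Claim_equal_amount_compress : Prop := ∀ (n : Int), Dom_amount_compress n → Spec_amount_compress n (amount_compress n)

-- ===== LEMMAS AND PROOFS =====

-- every nonzero integer is 10^k * m with k ≤ j and (k = j or 10 ∤ m)
lemma pv_decomp : ∀ (j : Nat) (n : Int), n ≠ 0 →
    ∃ (k : Nat) (m : Int), k ≤ j ∧ n = 10 ^ k * m ∧ (k = j ∨ ¬ (10 : Int) ∣ m) := by
  intro j
  induction j with
  | zero => intro n hn; exact ⟨0, n, le_refl 0, by ring, Or.inl rfl⟩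
  | succ j ih =>
    intro n hn
    by_cases hd : (10 : Int) ∣ n
    · obtain ⟨t, rfl⟩ := hd
      have ht : t ≠ 0 := by rintro rfl; simp at hn
      obtain ⟨k, m, hk, hEq, hc⟩ := ih t ht
      refine ⟨k + 1, m, by omega, by rw [hEq]; ring, ?_⟩
      rcases hc with h | h
      · exact Or.inl (by omega)
      · exact Or.inr h
    · exact ⟨0, n, Nat.zero_le _, by ring, Or.inr hd⟩

lemma pv_mod_ten_ne (m : Int) (hm : ¬ (10 : Int) ∣ m) : PySem.Int.mod m 10 ≠ 0 := by
  intro h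
  exact hm ((PySem.Int.mod_eq_zero_iff_dvd m 10).mp h)

lemma pv_fdiv_ten (x : Int) : PySem.Int.floordiv (10 * x) 10 = x := by
  rw [PySem.Int.floordiv_eq_ediv_of_pos (by norm_num)]
  exact Int.mul_ediv_cancel_left x (by norm_num)

-- characterisation of A's loop
lemma pv_loopA_spec : ∀ (k : Nat) (e m : Int), 0 ≤ e → e + k ≤ 9 →
    (e + k = 9 ∨ ¬ (10 : Int) ∣ m) → pvLoopA ((10 : Int) ^ k * m) e = (m, e + k) := by
  intro k
  induction k with
  | zero =>
    intro e m _ _ hc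
    rw [pvLoopA]
    rcases hc with h | h
    · rw [if_neg (by push Not; intro _; omega)]; simp
    · rw [if_neg (by push Not; intro hmod; exact absurd hmod (by simpa using pv_mod_ten_ne m h))]
      simp
  | succ k ih =>
    intro e m he h9 hc
    rw [pvLoopA]
    rw [if_pos ?hcond]
    case hcond =>
      constructor
      · rw [PySem.Int.mod_eq_zero_iff_dvd]
        exact ⟨10 ^ k * m, by ring⟩
      · omega
    have hrw : PySem.Int.floordiv ((10 : Int) ^ (k + 1) * m) 10 = (10 : Int) ^ k * m := by
      rw [show (10 : Int) ^ (k + 1) * m = 10 * (10 ^ k * m) by ring, pv_fdiv_ten]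
    rw [hrw, ih (e + 1) m (by omega) (by omega) (by rcases hc with h | h; exacts [Or.inl (by omega), Or.inr h])]
    congr 1
    omega

lemma pv_fdiv_pow (k : Nat) (m : Int) :
    PySem.Int.floordiv ((10 : Int) ^ k * m) ((10 : Int) ^ k) = m := by
  rw [PySem.Int.floordiv_eq_ediv_of_pos (by positivity)]
  exact Int.mul_ediv_cancel_left m (by positivity)

-- decimal digit list of a Nat, most significant first (proof-side model of Nat.toDigits 10)
def pvD (n : Nat) : List Char :=
  if h : n / 10 = 0 then [Nat.digitChar (n % 10)]
  else pvD (n / 10) ++ [Nat.digitChar (n % 10)]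
termination_by n
decreasing_by exact Nat.div_lt_self (by omega) (by norm_num)

lemma pv_tdc : ∀ (n : Nat), ∀ (f : Nat) (acc : List Char), n < f →
    Nat.toDigitsCore 10 f n acc = pvD n ++ acc := by
  intro n
  induction n using Nat.strong_induction_on with
  | _ n ih =>
    intro f acc hf
    match f with
    | f + 1 =>
      rw [Nat.toDigitsCore, pvD]
      by_cases h : n / 10 = 0
      · simp [h]
      · simp only [h]
        have hlt : n / 10 < n := Nat.div_lt_self (by omega) (by norm_num)
        rw [ih (n / 10) hlt f _ (by omega)]
        simp

lemma pv_toChars_nonneg (n : Int) (h : 0 ≤ n) : PySem.Int.toChars n = pvD n.toNat := by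
  rw [show PySem.Int.toChars n =
      (if n < 0 then '-' :: Nat.toDigits 10 n.natAbs else Nat.toDigits 10 n.toNat) from rfl,
    if_neg (by omega), Nat.toDigits, pv_tdc n.toNat (n.toNat + 1) [] (by omega)]
  simp

lemma pv_toChars_neg (n : Int) (h : n < 0) : PySem.Int.toChars n = '-' :: pvD n.natAbs := by
  rw [show PySem.Int.toChars n =
      (if n < 0 then '-' :: Nat.toDigits 10 n.natAbs else Nat.toDigits 10 n.toNat) from rfl,
    if_pos h, Nat.toDigits, pv_tdc n.natAbs (n.natAbs + 1) [] (by omega)]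
  simp

lemma pvD_concat (m : Nat) : ∃ ys, pvD m = ys ++ [Nat.digitChar (m % 10)] := by
  rw [pvD]
  by_cases h : m / 10 = 0
  · exact ⟨[], by simp [h]⟩
  · exact ⟨pvD (m / 10), by simp [h]⟩

lemma pvD_mul10 (m : Nat) (hm : 0 < m) : pvD (10 * m) = pvD m ++ ['0'] := by
  rw [pvD]
  have h1 : 10 * m / 10 = m := by omega
  have h2 : 10 * m % 10 = 0 := by omega
  rw [dif_neg (by omega)]
  simp [h1, h2, Nat.digitChar]

lemma pvD_pow (a m : Nat) (hm : 0 < m) :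
    pvD (10 ^ a * m) = pvD m ++ List.replicate a '0' := by
  induction a with
  | zero => simp
  | succ a ih =>
    have : 10 ^ (a + 1) * m = 10 * (10 ^ a * m) := by ring
    rw [this, pvD_mul10 _ (by positivity), ih, List.replicate_succ']
    simp

lemma pv_digitChar_ne (d : Nat) (h1 : d < 10) (h2 : d ≠ 0) : (Nat.digitChar d == '0') = false := by
  interval_cases d <;> simp_all <;> decide

lemma pv_trail (ys : List Char) (c : Char) (hc : (c == '0') = false) (a : Nat) :
    (((ys ++ [c]) ++ List.replicate a '0').reverse.takeWhile (fun x => x == '0')).length = a := by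
  rw [List.reverse_append, List.reverse_replicate, List.reverse_append]
  simp only [List.reverse_singleton, List.singleton_append]
  induction a with
  | zero => simp [hc]
  | succ a ih =>
    rw [List.replicate_succ, List.cons_append, List.takeWhile]
    simpa using ih

-- the length expression B computes is the trailing-zero count of the string
lemma pv_rstrip_len (cs : List Char) :
    (cs.length : Int) - ((pvRstrip0 cs).length : Int)
      = ((cs.reverse.takeWhile (fun x => x == '0')).length : Int) := by
  unfold pvRstrip0
  have h := congrArg List.length
    (List.takeWhile_append_dropWhile (p := fun x => x == '0') (l := cs.reverse))
  simp only [List.length_append, List.length_reverse] at h ⊢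
  omega

-- trailing-zero count of str(10^a * m) is exactly a when 10 ∤ m
lemma pv_trail_toChars (a : Nat) (m : Int) (hm0 : m ≠ 0) (hm : ¬ (10 : Int) ∣ m) :
    ((PySem.Int.toChars ((10 : Int) ^ a * m)).reverse.takeWhile (fun x => x == '0')).length = a := by
  have hd : m.natAbs % 10 ≠ 0 := by
    intro h
    exact hm (Int.natAbs_dvd_natAbs.mp (Nat.dvd_of_mod_eq_zero h))
  have habs : ((10 : Int) ^ a * m).natAbs = 10 ^ a * m.natAbs := by
    rw [Int.natAbs_mul, Int.natAbs_pow]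
    rfl
  obtain ⟨ys, hys⟩ := pvD_concat m.natAbs
  have hlast : (Nat.digitChar (m.natAbs % 10) == '0') = false :=
    pv_digitChar_ne _ (Nat.mod_lt _ (by norm_num)) hd
  rcases lt_trichotomy m 0 with hneg | rfl | hpos
  · have hn : (10 : Int) ^ a * m < 0 := by
      have : (0 : Int) < 10 ^ a := by positivity
      exact mul_neg_of_pos_of_neg this hneg
    rw [pv_toChars_neg _ hn, habs, pvD_pow a m.natAbs (by omega), hys]
    have : '-' :: ((ys ++ [Nat.digitChar (m.natAbs % 10)]) ++ List.replicate a '0')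
        = (('-' :: ys) ++ [Nat.digitChar (m.natAbs % 10)]) ++ List.replicate a '0' := by simp
    rw [this, pv_trail _ _ hlast]
  · exact absurd rfl hm0
  · have hn : (0 : Int) ≤ 10 ^ a * m := by positivity
    have htoNat : ((10 : Int) ^ a * m).toNat = 10 ^ a * m.natAbs := by
      rw [← habs]; omega
    rw [pv_toChars_nonneg _ hn, htoNat, pvD_pow a m.natAbs (by omega), hys, pv_trail _ _ hlast]

-- ===== VERDICT (by name: the statement is the Claim_ definition above) =====
theorem amount_compress_spec : Claim_equal_amount_compress := by
  intro n hdom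
  unfold Spec_amount_compress
  by_cases h0 : n = 0
  · simp [amount_compress, amount_compress_alt, h0]
  · obtain ⟨k, m, hk, rfl, hc⟩ := pv_decomp 9 n h0
    have hm0 : m ≠ 0 := by rintro rfl; simp at h0
    -- inside Dom (|n| ≤ 2^31 < 10^10) the k = 9 case cannot have another factor 10
    have hm : ¬ (10 : Int) ∣ m := by
      rcases hc with rfl | h
      · rintro ⟨t, rfl⟩
        have hdom' : -2147483648 ≤ (10 : Int) ^ 9 * (10 * t) ∧
            (10 : Int) ^ 9 * (10 * t) ≤ 2147483648 := by
          simpa [Dom_amount_compress, pvDomInt] using hdom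
        have ht : t ≠ 0 := by rintro rfl; simp at h0
        have : (10 : Int) ^ 9 * (10 * t) = 10000000000 * t := by ring
        omega
      · exact h
    unfold amount_compress amount_compress_alt
    rw [if_neg h0, if_neg h0]
    have hloop := pv_loopA_spec k 0 m le_rfl (by omega) (Or.inr hm)
    have htrail := pv_trail_toChars k m hm0 hm
    simp only [hloop, pv_rstrip_len, htrail, zero_add]
    have hmin : min (9 : Int) (k : Int) = (k : Int) := by omega
    rw [hmin]
    have htn : ((k : Int)).toNat = k := by omega
    rw [htn, pv_fdiv_pow]
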